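-- pv_equiv track=rewrite | github.com/eerivera/pbt_sideproject | toposortacle/appendix/properties.py | p6
-- ===== SOURCE A (Python) =====
-- def p6(instr, outstr):
--     for i, node in enumerate(outstr):
--         contained_edges = {}
--         for edge_start, edge_end in instr:
--             if edge_end == node:
--                 if edge_start not in contained_edges:
--                     contained_edges[edge_start] = 0
--                 contained_edges[edge_start] += 1
--
--         prev_node_edges = {}
--         for prev_i, prev_node in enumerate(outstr[:i]):
--             if prev_node not in prev_node_edges:
--                 prev_node_edges[prev_node] = 0
--             prev_node_edges[prev_node] += 1
--
--         valid_subset = all(item in prev_node_edges.items()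
--                            for item in contained_edges.items())
--         if not valid_subset:
--             return False
--
--     return True
-- ===== SOURCE B (Python) =====
-- def p6(instr, outstr):
--     # Group incoming-edge multiplicities by endpoint once, then sweep outstr
--     # while maintaining prefix node counts incrementally.
--     incoming = {}
--     for s, e in instr:
--         d = incoming.setdefault(e, {})
--         d[s] = d.get(s, 0) + 1
--     prefix = {}
--     for node in outstr:
--         for s, c in incoming.get(node, {}).items():
--             if prefix.get(s, 0) != c:
--                 return False
--         prefix[node] = prefix.get(node, 0) + 1
--     return True
-- ===== Notes on version B (the rewrite author's own statement) =====
-- stated objective: faster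
-- what changed: Instead of rebuilding, for every output position, a counter of all matching edges and a counter of the whole prefix, B groups incoming-edge multiplicities by endpoint once and maintains the prefix counts incrementally in a single sweep.
import Mathlib
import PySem

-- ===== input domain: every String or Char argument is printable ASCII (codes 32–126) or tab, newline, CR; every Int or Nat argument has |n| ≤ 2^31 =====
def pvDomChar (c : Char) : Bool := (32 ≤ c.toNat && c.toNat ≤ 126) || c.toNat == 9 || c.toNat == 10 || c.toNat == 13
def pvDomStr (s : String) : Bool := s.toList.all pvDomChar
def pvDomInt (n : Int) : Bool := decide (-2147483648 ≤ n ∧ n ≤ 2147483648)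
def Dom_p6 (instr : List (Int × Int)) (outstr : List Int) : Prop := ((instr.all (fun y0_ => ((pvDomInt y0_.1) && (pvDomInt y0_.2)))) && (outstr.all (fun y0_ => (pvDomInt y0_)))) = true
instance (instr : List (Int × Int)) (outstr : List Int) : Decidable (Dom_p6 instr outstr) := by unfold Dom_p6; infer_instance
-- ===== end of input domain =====

-- B groups incoming-edge multiplicities by endpoint once and keeps prefix counts
-- incrementally (one sweep), instead of A's per-position rebuild of both counters.

-- ===== PORT A =====
-- contained_edges: counts of edge starts whose end equals node (A's inner loop over instr)
def pvContained (instr : List (Int × Int)) (node : Int) : PySem.Dict Int Int :=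
  instr.foldl (fun d p => if p.2 == node then d.insert p.1 (d.getD p.1 0 + 1) else d)
    PySem.Dict.empty

-- prev_node_edges: counts of outstr[:i] (A's second inner loop)
def pvPrev (outstr : List Int) (i : Nat) : PySem.Dict Int Int :=
  (PySem.List.slice outstr none (some (i : Int))).foldl
    (fun d x => d.insert x (d.getD x 0 + 1)) PySem.Dict.empty

-- the outer 'for i, node in enumerate(outstr)' with early return False
def p6go (instr : List (Int × Int)) (outstr : List Int) (i : Nat) : List Int → Bool
  | [] => true
  | node :: rest =>
    if (pvContained instr node).items.all (fun it => (pvPrev outstr i).items.contains it)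
    then p6go instr outstr (i + 1) rest
    else false

def p6 (instr : List (Int × Int)) (outstr : List Int) : Bool :=
  p6go instr outstr 0 outstr

-- ===== PORT B =====
-- incoming[e][s] = multiplicity of edge (s, e), built in one pass
def pvIncoming (instr : List (Int × Int)) : PySem.Dict Int (PySem.Dict Int Int) :=
  instr.foldl
    (fun m p =>
      let d := m.getD p.2 PySem.Dict.empty
      m.insert p.2 (d.insert p.1 (d.getD p.1 0 + 1)))
    PySem.Dict.empty

-- the sweep: check node against the running prefix counter, then count it
def p6altGo (incoming : PySem.Dict Int (PySem.Dict Int Int))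
    (pfx : PySem.Dict Int Int) : List Int → Bool
  | [] => true
  | node :: rest =>
    if (incoming.getD node PySem.Dict.empty).items.all (fun sc => pfx.getD sc.1 0 == sc.2)
    then p6altGo incoming (pfx.insert node (pfx.getD node 0 + 1)) rest
    else false

def p6_alt (instr : List (Int × Int)) (outstr : List Int) : Bool :=
  p6altGo (pvIncoming instr) PySem.Dict.empty outstr

-- ===== PRECONDITION & SPEC =====
def Spec_p6 (instr : List (Int × Int)) (outstr : List Int) (out : Bool) : Prop := out = p6_alt instr outstr
instance (instr : List (Int × Int)) (outstr : List Int) (out : Bool) : Decidable (Spec_p6 instr outstr out) := by unfold Spec_p6; infer_instance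

-- ===== CLAIM (what is proved, stated in full; the proofs are below) =====
def Claim_equal_p6 : Prop := ∀ (instr : List (Int × Int)) (outstr : List Int), Dom_p6 instr outstr → Spec_p6 instr outstr (p6 instr outstr)

-- ===== LEMMAS AND PROOFS =====

lemma pvAllCongr {α : Type} (l : List α) (p q : α → Bool) (h : ∀ x ∈ l, p x = q x) :
    l.all p = l.all q := by
  induction l with
  | nil => rfl
  | cons a t ih => simp [List.all_cons, h a (by simp), ih (fun x hx => h x (by simp [hx]))]

-- looking up one endpoint in B's grouped dict replays A's filtered counting loop
lemma incoming_getD (instr : List (Int × Int)) (node : Int) :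
    ∀ m : PySem.Dict Int (PySem.Dict Int Int),
      (instr.foldl
        (fun m p =>
          let d := m.getD p.2 PySem.Dict.empty
          m.insert p.2 (d.insert p.1 (d.getD p.1 0 + 1)))
        m).getD node PySem.Dict.empty
      = instr.foldl (fun d p => if p.2 == node then d.insert p.1 (d.getD p.1 0 + 1) else d)
          (m.getD node PySem.Dict.empty) := by
  induction instr with
  | nil => intro m; rfl
  | cons p rest ih =>
    intro m
    simp only [List.foldl_cons, ih]
    rw [PySem.Dict.getD_insert]
    by_cases h : p.2 = node
    · subst h; simp
    · rw [if_neg (fun e => h e.symm)]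
      have hb : (p.2 == node) = false := by simpa using h
      rw [hb]
      simp

-- the filtered counting loop is the counter of the filtered starts
lemma contained_eq_counter (instr : List (Int × Int)) (node : Int) :
    ∀ d0 : PySem.Dict Int Int,
      instr.foldl (fun d p => if p.2 == node then d.insert p.1 (d.getD p.1 0 + 1) else d) d0
      = ((instr.filter (fun p => p.2 == node)).map (·.1)).foldl
          (fun d x => d.insert x (d.getD x 0 + 1)) d0 := by
  induction instr with
  | nil => intro d0; rfl
  | cons p rest ih =>
    intro d0
    simp only [List.foldl_cons, List.filter_cons]
    by_cases h : p.2 = node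
    · have hb : (p.2 == node) = true := by simpa using h
      simp only [hb, if_true, List.map_cons, List.foldl_cons]
      exact ih _
    · have hb : (p.2 == node) = false := by simpa using h
      simp only [hb, Bool.false_eq_true, if_false]
      exact ih d0

lemma mem_items_counter_iff (pre : List Int) (k v : Int) (hv : 1 ≤ v) :
    ((k, v) ∈ (PySem.Dict.counter pre).items) ↔ ((pre.count k : Int) = v) := by
  rw [PySem.Dict.items_counter]
  simp only [List.mem_map, PySem.Set.mem_ofList]
  constructor
  · rintro ⟨k', hk', h⟩
    have h1 : k' = k := congrArg Prod.fst h
    have h2 : ((pre.count k' : Nat) : Int) = v := congrArg Prod.snd h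
    rw [← h1]; exact h2
  · intro h
    refine ⟨k, ?_, by simp [h]⟩
    have : 0 < pre.count k := by omega
    exact List.count_pos_iff.mp this

-- the per-node checks agree: pair-membership in the prefix counter's items
-- equals the count lookup, because every stored multiplicity is ≥ 1
lemma check_eq (instr : List (Int × Int)) (node : Int) (pre : List Int) :
    (pvContained instr node).items.all
        (fun it => (PySem.Dict.counter pre).items.contains it)
      = (pvContained instr node).items.all
        (fun sc => (PySem.Dict.counter pre).getD sc.1 0 == sc.2) := by
  apply pvAllCongr
  intro sc hsc
  have hc : pvContained instr node
      = PySem.Dict.counter ((instr.filter (fun p => p.2 == node)).map (·.1)) := by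
    unfold pvContained
    rw [contained_eq_counter, PySem.Dict.foldl_insert_getD_add_one_eq_counter]
  rw [hc] at hsc
  obtain ⟨k, v⟩ := sc
  have hv : 1 ≤ v := by
    rw [PySem.Dict.items_counter] at hsc
    obtain ⟨k', hk', h⟩ := List.mem_map.mp hsc
    have h2 : ((((instr.filter (fun p => p.2 == node)).map (·.1)).count k' : Nat) : Int) = v :=
      congrArg Prod.snd h
    have : 0 < ((instr.filter (fun p => p.2 == node)).map (·.1)).count k' :=
      List.count_pos_iff.mpr (((PySem.Set.mem_ofList _ _).mp hk'))
    omega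
  have hmem := mem_items_counter_iff pre k v hv
  rw [PySem.Dict.getD_counter, List.contains_eq_mem]
  by_cases h : (pre.count k : Int) = v
  · simp [hmem.mpr h, h]
  · have h1 : ¬ ((k, v) ∈ (PySem.Dict.counter pre).items) := fun hh => h (hmem.mp hh)
    simp [h1, h]

-- main loop invariant: after processing 'pre', B's running prefix counter is
-- exactly the counter A rebuilds from outstr[:i]
lemma go_eq (instr : List (Int × Int)) :
    ∀ (rest pre : List Int),
      p6go instr (pre ++ rest) pre.length rest
      = p6altGo (pvIncoming instr)
          (pre.foldl (fun d x => d.insert x (d.getD x 0 + 1)) PySem.Dict.empty) rest := by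
  intro rest
  induction rest with
  | nil => intro pre; rfl
  | cons node rest ih =>
    intro pre
    have hprev : pvPrev (pre ++ node :: rest) pre.length
        = pre.foldl (fun d x => d.insert x (d.getD x 0 + 1)) PySem.Dict.empty := by
      unfold pvPrev
      rw [PySem.List.slice_to_natCast, List.take_left]
    have hinc : (pvIncoming instr).getD node PySem.Dict.empty = pvContained instr node := by
      unfold pvIncoming pvContained
      rw [incoming_getD]
      simp [PySem.Dict.getD_empty]
    have hfold : pre.foldl (fun d x => d.insert x (d.getD x 0 + 1)) PySem.Dict.empty
        = PySem.Dict.counter pre := PySem.Dict.foldl_insert_getD_add_one_eq_counter pre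
    show (if (pvContained instr node).items.all
            (fun it => (pvPrev (pre ++ node :: rest) pre.length).items.contains it)
          then p6go instr (pre ++ node :: rest) (pre.length + 1) rest else false)
        = (if ((pvIncoming instr).getD node PySem.Dict.empty).items.all
              (fun sc => (pre.foldl (fun d x => d.insert x (d.getD x 0 + 1))
                PySem.Dict.empty).getD sc.1 0 == sc.2)
           then p6altGo (pvIncoming instr)
              ((pre.foldl (fun d x => d.insert x (d.getD x 0 + 1)) PySem.Dict.empty).insert node
                ((pre.foldl (fun d x => d.insert x (d.getD x 0 + 1))
                  PySem.Dict.empty).getD node 0 + 1)) rest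
           else false)
    rw [hprev, hinc, hfold, check_eq]
    split_ifs with hcond
    · have hpre : (pre ++ [node]).foldl (fun d x => d.insert x (d.getD x 0 + 1))
          PySem.Dict.empty
          = (PySem.Dict.counter pre).insert node ((PySem.Dict.counter pre).getD node 0 + 1) := by
        rw [List.foldl_append, hfold]
        rfl
      have := ih (pre ++ [node])
      rw [hpre] at this
      simpa [List.append_assoc] using this
    · rfl

-- ===== VERDICT (by name: the statement is the Claim_ definition above) =====
theorem p6_spec : Claim_equal_p6 := by
  intro instr outstr _
  unfold Spec_p6 p6 p6_alt
  exact go_eq instr outstr []
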